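-- pv_equiv track=rewrite | github.com/yycthe/Term-project-3 | agent.py | _narrow_range
-- ===== SOURCE A (Python) =====
-- def _narrow_range(original_sorted, top_values, buffer=1):
--     """Narrow a sorted list to the range observed in *top_values* +/- buffer steps."""
--     if not top_values or not original_sorted:
--         return list(original_sorted)
--     orig = sorted(original_sorted)
--     v_min, v_max = min(top_values), max(top_values)
--     indices = [i for i, v in enumerate(orig) if v_min <= v <= v_max]
--     if not indices:
--         return list(orig)
--     lo = max(0, min(indices) - buffer)
--     hi = min(len(orig) - 1, max(indices) + buffer)
--     return orig[lo : hi + 1]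
-- ===== SOURCE B (Python) =====
-- def _bisect_left(a, x):
--     lo, hi = 0, len(a)
--     while lo < hi:
--         mid = (lo + hi) // 2
--         if a[mid] < x:
--             lo = mid + 1
--         else:
--             hi = mid
--     return lo
--
--
-- def _bisect_right(a, x):
--     lo, hi = 0, len(a)
--     while lo < hi:
--         mid = (lo + hi) // 2
--         if x < a[mid]:
--             hi = mid
--         else:
--             lo = mid + 1
--     return lo
--
--
-- def _narrow_range(original_sorted, top_values, buffer=1):
--     """Narrow a sorted list to the range observed in *top_values* +/- buffer steps."""
--     if not top_values or not original_sorted: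
--         return list(original_sorted)
--     orig = sorted(original_sorted)
--     v_min, v_max = min(top_values), max(top_values)
--     left = _bisect_left(orig, v_min)
--     right = _bisect_right(orig, v_max)
--     if left == right:
--         return list(orig)
--     lo = max(0, left - buffer)
--     hi = min(len(orig) - 1, right - 1 + buffer)
--     return orig[lo:hi + 1]
-- ===== Notes on version B (the rewrite author's own statement) =====
-- stated objective: alternative
-- what changed: A's linear enumerate-and-filter scan that collects all in-range indices and takes their min/max is replaced by two hand-written binary searches (bisect_left/bisect_right) that locate the contiguous in-range block in O(log n) after the sort.
import Mathlib
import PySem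

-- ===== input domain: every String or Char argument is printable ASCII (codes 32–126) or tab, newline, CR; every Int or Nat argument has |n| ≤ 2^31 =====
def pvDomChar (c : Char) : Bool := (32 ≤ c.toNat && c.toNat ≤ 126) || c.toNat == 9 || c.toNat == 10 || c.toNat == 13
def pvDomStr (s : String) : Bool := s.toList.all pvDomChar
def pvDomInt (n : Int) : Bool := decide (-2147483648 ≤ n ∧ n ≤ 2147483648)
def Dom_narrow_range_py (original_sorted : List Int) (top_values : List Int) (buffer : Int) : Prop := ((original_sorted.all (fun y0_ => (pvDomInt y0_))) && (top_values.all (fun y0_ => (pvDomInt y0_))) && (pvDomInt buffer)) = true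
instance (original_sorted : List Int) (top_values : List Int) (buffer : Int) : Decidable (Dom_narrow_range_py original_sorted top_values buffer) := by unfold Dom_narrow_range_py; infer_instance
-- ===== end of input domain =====

-- B replaces A's full scan of all indices in [v_min, v_max] by two hand-written
-- binary searches on the sorted list (objective: alternative algorithm, same asymptotic cost).

-- ===== PORT A =====
def narrow_range_py (original_sorted : List Int) (top_values : List Int) (buffer : Int) : List Int :=
  if top_values = [] || original_sorted = [] then original_sorted
  else
    let orig := PySem.List.sorted original_sorted (fun y => y)
    let v_min := (PySem.List.min? top_values (fun y => y)).getD 0   -- top_values nonempty here, so min/max exist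
    let v_max := (PySem.List.max? top_values (fun y => y)).getD 0
    let indices := ((PySem.List.enumerate orig).filter
        (fun p => decide (v_min ≤ p.2) && decide (p.2 ≤ v_max))).map (fun p => p.1)
    if indices = [] then orig
    else
      let lo := max 0 ((PySem.List.min? indices (fun y => y)).getD 0 - buffer)
      let hi := min ((orig.length : Int) - 1) ((PySem.List.max? indices (fun y => y)).getD 0 + buffer)
      PySem.List.slice orig (some lo) (some (hi + 1))

-- ===== PORT B =====
-- Source B's hand-written `_bisect_left` while-loop; a[mid] is always in range (lo < hi ≤ len),
-- so `getD … 0` is exact there.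
def bisectLeftB (a : List Int) (x : Int) (lo hi : Nat) : Nat :=
  if lo < hi then
    if a.getD ((lo + hi) / 2) 0 < x then bisectLeftB a x ((lo + hi) / 2 + 1) hi
    else bisectLeftB a x lo ((lo + hi) / 2)
  else lo
termination_by hi - lo
decreasing_by all_goals omega

-- Source B's `_bisect_right` while-loop; same remark on `getD`.
def bisectRightB (a : List Int) (x : Int) (lo hi : Nat) : Nat :=
  if lo < hi then
    if x < a.getD ((lo + hi) / 2) 0 then bisectRightB a x lo ((lo + hi) / 2)
    else bisectRightB a x ((lo + hi) / 2 + 1) hi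
  else lo
termination_by hi - lo
decreasing_by all_goals omega

def narrow_range_py_alt (original_sorted : List Int) (top_values : List Int) (buffer : Int) : List Int :=
  if top_values = [] || original_sorted = [] then original_sorted
  else
    let orig := PySem.List.sorted original_sorted (fun y => y)
    let v_min := (PySem.List.min? top_values (fun y => y)).getD 0
    let v_max := (PySem.List.max? top_values (fun y => y)).getD 0
    let left := bisectLeftB orig v_min 0 orig.length
    let right := bisectRightB orig v_max 0 orig.length
    if left = right then orig
    else
      let lo := max 0 ((left : Int) - buffer)
      let hi := min ((orig.length : Int) - 1) ((right : Int) - 1 + buffer)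
      PySem.List.slice orig (some lo) (some (hi + 1))

-- ===== PRECONDITION & SPEC =====
def Spec_narrow_range_py (original_sorted : List Int) (top_values : List Int) (buffer : Int) (out : List Int) : Prop := out = narrow_range_py_alt original_sorted top_values buffer
instance (original_sorted : List Int) (top_values : List Int) (buffer : Int) (out : List Int) : Decidable (Spec_narrow_range_py original_sorted top_values buffer out) := by unfold Spec_narrow_range_py; infer_instance

-- ===== CLAIM (what is proved, stated in full; the proofs are below) =====
def Claim_equal_narrow_range_py : Prop := ∀ (original_sorted : List Int) (top_values : List Int) (buffer : Int), Dom_narrow_range_py original_sorted top_values buffer → Spec_narrow_range_py original_sorted top_values buffer (narrow_range_py original_sorted top_values buffer)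

-- ===== LEMMAS AND PROOFS =====

-- On a sorted list, a downward-closed predicate holds exactly on the prefix of length `countP p`.
lemma countP_boundary (p : Int → Bool) (hmono : ∀ x y : Int, x ≤ y → p y → p x) :
    ∀ (a : List Int), a.Pairwise (· ≤ ·) → ∀ (i : Nat) (h : i < a.length),
      (p a[i] = true ↔ i < a.countP p) := by
  intro a
  induction a with
  | nil => intro _ i h; simp at h
  | cons x t ih =>
    intro hp i h
    rcases List.pairwise_cons.mp hp with ⟨hx, ht⟩
    by_cases hpx : p x = true
    · rcases i with _ | j
      · simp [List.countP_cons_of_pos hpx, hpx]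
      · rw [List.countP_cons_of_pos hpx]
        simp only [List.getElem_cons_succ]
        rw [ih ht j (by simpa using h)]
        omega
    · have hz : t.countP p = 0 := List.countP_eq_zero.mpr (fun y hy hpy =>
        hpx (hmono x y (hx y hy) hpy))
      have hc : (x :: t).countP p = 0 := by simp [hpx, hz]
      rw [hc]
      rcases i with _ | j
      · simpa using hpx
      · have hj : j < t.length := by simpa using h
        have : ¬ p t[j] = true := by
          have := List.countP_eq_zero.mp hz t[j] (List.getElem_mem hj)
          simpa using this
        simp [this]

lemma bisectLeftB_eq (a : List Int) (x : Int) (ha : a.Pairwise (· ≤ ·)) :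
    ∀ (n lo hi : Nat), hi - lo ≤ n → lo ≤ hi → hi ≤ a.length →
      lo ≤ a.countP (fun y => decide (y < x)) → a.countP (fun y => decide (y < x)) ≤ hi →
      bisectLeftB a x lo hi = a.countP (fun y => decide (y < x)) := by
  intro n
  induction n with
  | zero => intro lo hi h1 h2 _ h4 h5; rw [bisectLeftB]; simp only [if_neg (by omega : ¬ lo < hi)]; omega
  | succ n ih =>
    intro lo hi h1 h2 h3 h4 h5
    rw [bisectLeftB]
    by_cases hlt : lo < hi
    · simp only [if_pos hlt]
      have hmid : (lo + hi) / 2 < a.length := by omega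
      have hget : a.getD ((lo + hi) / 2) 0 = a[(lo + hi) / 2] := List.getD_eq_getElem a 0 hmid
      have hb := countP_boundary (fun y => decide (y < x))
        (fun u v huv hv => by simp at hv ⊢; omega) a ha ((lo + hi) / 2) hmid
      by_cases hc : a.getD ((lo + hi) / 2) 0 < x
      · rw [if_pos hc]
        have : (lo + hi) / 2 < a.countP (fun y => decide (y < x)) := by
          apply hb.mp; rw [← hget]; simpa using hc
        exact ih ((lo + hi) / 2 + 1) hi (by omega) (by omega) h3 (by omega) h5
      · rw [if_neg hc]
        have : ¬ (lo + hi) / 2 < a.countP (fun y => decide (y < x)) := by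
          intro hcon
          exact hc (by rw [hget]; simpa using hb.mpr hcon)
        exact ih lo ((lo + hi) / 2) (by omega) (by omega) (by omega) h4 (by omega)
    · simp only [if_neg hlt]; omega

lemma bisectRightB_eq (a : List Int) (x : Int) (ha : a.Pairwise (· ≤ ·)) :
    ∀ (n lo hi : Nat), hi - lo ≤ n → lo ≤ hi → hi ≤ a.length →
      lo ≤ a.countP (fun y => decide (y ≤ x)) → a.countP (fun y => decide (y ≤ x)) ≤ hi →
      bisectRightB a x lo hi = a.countP (fun y => decide (y ≤ x)) := by
  intro n
  induction n with
  | zero => intro lo hi h1 h2 _ h4 h5; rw [bisectRightB]; simp only [if_neg (by omega : ¬ lo < hi)]; omega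
  | succ n ih =>
    intro lo hi h1 h2 h3 h4 h5
    rw [bisectRightB]
    by_cases hlt : lo < hi
    · simp only [if_pos hlt]
      have hmid : (lo + hi) / 2 < a.length := by omega
      have hget : a.getD ((lo + hi) / 2) 0 = a[(lo + hi) / 2] := List.getD_eq_getElem a 0 hmid
      have hb := countP_boundary (fun y => decide (y ≤ x))
        (fun u v huv hv => by simp at hv ⊢; omega) a ha ((lo + hi) / 2) hmid
      by_cases hc : x < a.getD ((lo + hi) / 2) 0
      · rw [if_pos hc]
        have : ¬ (lo + hi) / 2 < a.countP (fun y => decide (y ≤ x)) := by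
          intro hcon
          have := hb.mpr hcon
          rw [hget] at hc; simp at this; omega
        exact ih lo ((lo + hi) / 2) (by omega) (by omega) (by omega) h4 (by omega)
      · rw [if_neg hc]
        have : (lo + hi) / 2 < a.countP (fun y => decide (y ≤ x)) := by
          apply hb.mp; rw [hget] at hc; simp; omega
        exact ih ((lo + hi) / 2 + 1) hi (by omega) (by omega) h3 (by omega) h5
    · simp only [if_neg hlt]; omega

-- A's index list on a sorted list is the contiguous block of indices [L, R).
lemma idxs_eq (v_min v_max : Int) (hv : v_min ≤ v_max) :
    ∀ (a : List Int) (s : Int), a.Pairwise (· ≤ ·) →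
      ((PySem.List.enumerate a s).filter
          (fun p => decide (v_min ≤ p.2) && decide (p.2 ≤ v_max))).map (fun p => p.1)
      = (List.range (a.countP (fun y => decide (y ≤ v_max)) - a.countP (fun y => decide (y < v_min)))).map
          (fun k : Nat => s + (a.countP (fun y => decide (y < v_min)) : Int) + (k : Int)) := by
  intro a
  induction a with
  | nil => intro s _; simp [PySem.List.enumerate]
  | cons x t ih =>
    intro s hp
    rcases List.pairwise_cons.mp hp with ⟨hx, ht⟩
    rw [PySem.List.enumerate_cons]
    rw [List.filter_cons]
    by_cases h1 : x < v_min
    · simp only [show (decide (v_min ≤ (s, x).2) && decide ((s, x).2 ≤ v_max)) = false by simp; omega,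
        Bool.false_eq_true, if_false]
      rw [ih (s + 1) ht]
      have hL : (x :: t).countP (fun y => decide (y < v_min)) = t.countP (fun y => decide (y < v_min)) + 1 := by
        rw [List.countP_cons]; simp [h1]
      have hR : (x :: t).countP (fun y => decide (y ≤ v_max)) = t.countP (fun y => decide (y ≤ v_max)) + 1 := by
        rw [List.countP_cons]; simp; omega
      rw [hL, hR]
      have harith : ∀ k : Nat, s + 1 + (t.countP (fun y => decide (y < v_min)) : Int) + (k : Int)
          = s + ((t.countP (fun y => decide (y < v_min)) + 1 : Nat) : Int) + (k : Int) := by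
        intro k; push_cast; ring
      have hrange : t.countP (fun y => decide (y ≤ v_max)) - t.countP (fun y => decide (y < v_min))
          = t.countP (fun y => decide (y ≤ v_max)) + 1 - (t.countP (fun y => decide (y < v_min)) + 1) := by omega
      rw [← hrange]
      exact List.map_congr_left (fun k _ => harith k)
    · by_cases h2 : x ≤ v_max
      · simp only [show (decide (v_min ≤ (s, x).2) && decide ((s, x).2 ≤ v_max)) = true by simp; omega,
          if_true, List.map_cons]
        rw [ih (s + 1) ht]
        have hge : ∀ y ∈ x :: t, ¬ (fun y => decide (y < v_min)) y = true := by
          intro y hy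
          rcases List.mem_cons.mp hy with rfl | hyt
          · simp; omega
          · have := hx y hyt; simp; omega
        have hL0 : (x :: t).countP (fun y => decide (y < v_min)) = 0 := List.countP_eq_zero.mpr hge
        have hLt0 : t.countP (fun y => decide (y < v_min)) = 0 :=
          List.countP_eq_zero.mpr (fun y hy => hge y (List.mem_cons_of_mem x hy))
        have hR : (x :: t).countP (fun y => decide (y ≤ v_max)) = t.countP (fun y => decide (y ≤ v_max)) + 1 := by
          rw [List.countP_cons]; simp [h2]
        rw [hL0, hR, hLt0]
        simp only [Nat.sub_zero, List.range_succ_eq_map, List.map_cons, List.map_map]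
        refine List.cons_eq_cons.mpr ⟨by ring, ?_⟩
        exact List.map_congr_left (fun k _ => by simp [Function.comp]; ring)
      · simp only [show (decide (v_min ≤ (s, x).2) && decide ((s, x).2 ≤ v_max)) = false by simp; omega,
          Bool.false_eq_true, if_false]
        rw [ih (s + 1) ht]
        have hgt : ∀ y ∈ x :: t, v_max < y := by
          intro y hy
          rcases List.mem_cons.mp hy with rfl | hyt
          · omega
          · have := hx y hyt; omega
        have hR0 : (x :: t).countP (fun y => decide (y ≤ v_max)) = 0 :=
          List.countP_eq_zero.mpr (fun y hy => by have := hgt y hy; simp; omega)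
        have hRt0 : t.countP (fun y => decide (y ≤ v_max)) = 0 :=
          List.countP_eq_zero.mpr (fun y hy => by have := hgt y (List.mem_cons_of_mem x hy); simp; omega)
        have hLt0 : t.countP (fun y => decide (y < v_min)) = 0 :=
          List.countP_eq_zero.mpr (fun y hy => by have := hgt y (List.mem_cons_of_mem x hy); simp; omega)
        rw [hR0, hRt0, hLt0]
        simp
  
-- min/max of an arithmetic progression c, c+1, …, c+n-1.
lemma min?_prog (c : Int) (n : Nat) (hn : 0 < n) :
    PySem.List.min? ((List.range n).map (fun k : Nat => c + (k : Int))) (fun y => y) = some c := by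
  set l := (List.range n).map (fun k : Nat => c + (k : Int)) with hl
  have hne : l ≠ [] := by simp [hl]; omega
  cases hm : PySem.List.min? l (fun y => y) with
  | none => exact absurd ((PySem.List.min?_eq_none_iff l _).mp hm) hne
  | some m =>
    have hmem := PySem.List.min?_mem hm
    have hmin := PySem.List.min?_isMin hm
    have hc : c ∈ l := by
      rw [hl]; refine List.mem_map.mpr ⟨0, ?_, by simp⟩; simp; omega
    have h1 : m ≤ c := hmin c hc
    have h2 : c ≤ m := by
      rcases List.mem_map.mp (hl ▸ hmem) with ⟨k, _, rfl⟩; omega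
    simp [le_antisymm h1 h2]

lemma max?_prog (c : Int) (n : Nat) (hn : 0 < n) :
    PySem.List.max? ((List.range n).map (fun k : Nat => c + (k : Int))) (fun y => y) = some (c + (n : Int) - 1) := by
  set l := (List.range n).map (fun k : Nat => c + (k : Int)) with hl
  have hne : l ≠ [] := by simp [hl]; omega
  cases hm : PySem.List.max? l (fun y => y) with
  | none =>
    exfalso
    rw [PySem.List.max?_eq_none_iff] at hm
    exact hne hm
  | some m =>
    have hmem := PySem.List.max?_mem hm
    have hmax := PySem.List.max?_isMax hm
    have hc : c + (n : Int) - 1 ∈ l := by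
      rw [hl]
      refine List.mem_map.mpr ⟨n - 1, by simp; omega, ?_⟩
      push_cast [Nat.cast_sub (by omega : 1 ≤ n)]; ring
    have h1 : c + (n : Int) - 1 ≤ m := hmax _ hc
    have h2 : m ≤ c + (n : Int) - 1 := by
      rcases List.mem_map.mp (hl ▸ hmem) with ⟨k, hk, rfl⟩
      simp at hk; omega
    simp [le_antisymm h2 h1]

-- ===== VERDICT (by name: the statement is the Claim_ definition above) =====
theorem narrow_range_py_spec : Claim_equal_narrow_range_py := by
  intro original_sorted top_values buffer _
  unfold Spec_narrow_range_py narrow_range_py narrow_range_py_alt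
  by_cases hguard : top_values = [] || original_sorted = []
  · simp only [if_pos hguard]
  · simp only [if_neg hguard]
    simp only [Bool.or_eq_true, decide_eq_true_eq, not_or] at hguard
    obtain ⟨htv, hos⟩ := hguard
    set orig := PySem.List.sorted original_sorted (fun y => y) with horig
    have hsorted : orig.Pairwise (· ≤ ·) := PySem.List.sorted_pairwise original_sorted (fun y => y)
    have hone : orig ≠ [] := fun h => hos ((PySem.List.sorted_eq_nil_iff original_sorted _ _).mp h)
    -- min / max of top_values
    set vmin := (PySem.List.min? top_values (fun y => y)).getD 0 with hv1
    set vmax := (PySem.List.max? top_values (fun y => y)).getD 0 with hv2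
    obtain ⟨m1, hm1⟩ : ∃ m, PySem.List.min? top_values (fun y => y) = some m := by
      cases h : PySem.List.min? top_values (fun y => y) with
      | none => exact absurd ((PySem.List.min?_eq_none_iff _ _).mp h) htv
      | some m => exact ⟨m, rfl⟩
    obtain ⟨m2, hm2⟩ : ∃ m, PySem.List.max? top_values (fun y => y) = some m := by
      cases h : PySem.List.max? top_values (fun y => y) with
      | none =>
        rw [PySem.List.max?_eq_none_iff] at h
        exact absurd h htv
      | some m => exact ⟨m, rfl⟩
    have hvm1 : vmin = m1 := by rw [hv1, hm1]; rfl
    have hvm2 : vmax = m2 := by rw [hv2, hm2]; rfl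
    have hv : vmin ≤ vmax := by
      rw [hvm1, hvm2]
      exact PySem.List.min?_isMin hm1 m2 (PySem.List.max?_mem hm2)
    set L := orig.countP (fun y => decide (y < vmin)) with hL
    set R := orig.countP (fun y => decide (y ≤ vmax)) with hR
    have hLR : L ≤ R := by
      rw [hL, hR]
      exact List.countP_mono_left (fun y _ hy => by simp at hy ⊢; omega)
    have hRlen : R ≤ orig.length := List.countP_le_length
    have hleft : bisectLeftB orig vmin 0 orig.length = L :=
      bisectLeftB_eq orig vmin hsorted orig.length 0 orig.length (by omega) (by omega) le_rfl
        (by omega) (by omega)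
    have hright : bisectRightB orig vmax 0 orig.length = R :=
      bisectRightB_eq orig vmax hsorted orig.length 0 orig.length (by omega) (by omega) le_rfl
        (by omega) (by omega)
    have hidx := idxs_eq vmin vmax hv orig 0 hsorted
    rw [hidx, hleft, hright]
    by_cases hempty : L = R
    · have : R - L = 0 := by omega
      rw [this]
      simp [hempty]
    · have hlt : L < R := by omega
      have hne2 : (List.range (R - L)).map (fun k : Nat => (0 : Int) + (L : Int) + (k : Int)) ≠ [] := by
        simp; omega
      rw [if_neg hne2, if_neg hempty]
      have hmin := min?_prog ((0 : Int) + (L : Int)) (R - L) (by omega)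
      have hmax := max?_prog ((0 : Int) + (L : Int)) (R - L) (by omega)
      have hfun : (fun k : Nat => (0 : Int) + (L : Int) + (k : Int)) = (fun k : Nat => ((0 : Int) + (L : Int)) + (k : Int)) := rfl
      rw [hfun] at *
      rw [hmin, hmax]
      simp only [Option.getD_some]
      congr 2
      · omega
      · push_cast [Nat.cast_sub (le_of_lt hlt)]
        ring_nf
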